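-- pv_equiv track=rewrite | github.com/GeetaSMath/Logical_Problems_Python | daily_problems/same_vowel_group.py | same_vowel_group
-- ===== SOURCE A (Python) =====
-- def same_vowel_group(words):
--     first_word_vowels = set(ch for ch in words[0] if ch in 'aeiou')
--     result = [words[0]]
--
--     for word in words[1:]:
--         word_vowels=set(ch for ch in word if ch in 'aeiou')
--         if word_vowels==first_word_vowels:
--             result.append(word)
--
--     # for word in words[1:]:
--     #     if all(vowel in vowels for vowel in word) and all(vowel in word for vowel in vowels):
--     #         result.append(word)
--     return result
-- ===== SOURCE B (Python) =====
-- def _vowel_sig(w):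
--     # canonical vowel signature: the vowels present in w, in fixed 'aeiou' order
--     return tuple(c for c in 'aeiou' if c in w)
--
--
-- def same_vowel_group(words):
--     groups = {}
--     for w in words:
--         groups.setdefault(_vowel_sig(w), []).append(w)
--     return groups[_vowel_sig(words[0])]
-- ===== Notes on version B (the rewrite author's own statement) =====
-- stated objective: alternative
-- what changed: B replaces A's compare-each-word-to-the-reference-set loop by building a dict indexing all words by a canonical vowel-signature tuple in one pass and returning the bucket of the first word's signature.
import Mathlib
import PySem

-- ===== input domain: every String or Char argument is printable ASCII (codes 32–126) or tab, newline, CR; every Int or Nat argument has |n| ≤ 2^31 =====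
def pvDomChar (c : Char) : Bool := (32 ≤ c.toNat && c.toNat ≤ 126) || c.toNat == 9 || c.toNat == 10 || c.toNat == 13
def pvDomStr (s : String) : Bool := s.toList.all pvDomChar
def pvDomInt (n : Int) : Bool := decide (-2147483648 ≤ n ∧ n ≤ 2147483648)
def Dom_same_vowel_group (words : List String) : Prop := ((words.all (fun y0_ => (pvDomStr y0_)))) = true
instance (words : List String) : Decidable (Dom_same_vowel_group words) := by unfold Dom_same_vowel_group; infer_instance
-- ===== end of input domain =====

-- B builds a dict indexing every word by a canonical vowel-signature tuple in one pass
-- and returns the first word's bucket, instead of A's compare-to-reference-set loop.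

-- ===== PORT A =====
-- set(ch for ch in w if ch in 'aeiou')
def pvVowelSet (w : String) : PySem.Set Char :=
  PySem.Set.ofList (w.toList.filter (fun c => ['a','e','i','o','u'].contains c))

def same_vowel_group (words : List String) : List String :=
  match words with
  | [] => []      -- Python raises IndexError on words[0]; excluded by Pre_
  | w0 :: rest =>
    let first_word_vowels := pvVowelSet w0
    rest.foldl (fun result word =>
      let word_vowels := pvVowelSet word
      if PySem.Set.equal word_vowels first_word_vowels then result ++ [word] else result)
      [w0]

-- ===== PORT B =====
-- tuple(c for c in 'aeiou' if c in w)
def pvVowelSig (w : String) : List Char :=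
  ['a','e','i','o','u'].filter (fun c => w.toList.contains c)

def same_vowel_group_alt (words : List String) : List String :=
  let groups : PySem.Dict (List Char) (List String) :=
    words.foldl (fun d w => d.modify (pvVowelSig w) [] (fun l => l ++ [w])) PySem.Dict.empty
  match words with
  | [] => []      -- Python raises IndexError on words[0]; excluded by Pre_
  | w0 :: _ => groups.getD (pvVowelSig w0) []

-- ===== PRECONDITION & SPEC =====
-- A raises IndexError on the empty list (words[0]); excluded.
def Pre_same_vowel_group (words : List String) : Prop := words ≠ []
instance (words : List String) : Decidable (Pre_same_vowel_group words) := by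
  unfold Pre_same_vowel_group; infer_instance
def pvWitness_same_vowel_group : List String := (["ab", "cd", "ba"])

def Spec_same_vowel_group (words : List String) (out : List String) : Prop := out = same_vowel_group_alt words
instance (words : List String) (out : List String) : Decidable (Spec_same_vowel_group words out) := by unfold Spec_same_vowel_group; infer_instance

-- ===== CLAIM (what is proved, stated in full; the proofs are below) =====
def Claim_equal_same_vowel_group : Prop := ∀ (words : List String), Dom_same_vowel_group words → Pre_same_vowel_group words → Spec_same_vowel_group words (same_vowel_group words)

-- ===== LEMMAS AND PROOFS =====

-- set-equality of vowel sets coincides with equality of canonical signatures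
theorem vowelSet_equal_iff_sig_eq (v w : String) :
    PySem.Set.equal (pvVowelSet v) (pvVowelSet w) = true ↔ pvVowelSig v = pvVowelSig w := by
  rw [PySem.Set.equal_iff]
  constructor
  · intro h
    unfold pvVowelSig
    apply List.filter_congr
    intro c hc
    have h' := h c
    simp [pvVowelSet, PySem.Set.mem_ofList, List.mem_filter] at h'
    fin_cases hc <;> simp_all
  · intro h x
    by_cases hv : x ∈ (['a','e','i','o','u'] : List Char)
    · have : (x ∈ pvVowelSig v) ↔ (x ∈ pvVowelSig w) := by rw [h]
      simp only [pvVowelSig, List.mem_filter] at this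
      simp only [pvVowelSet, PySem.Set.mem_ofList, List.mem_filter]
      fin_cases hv <;> simp_all
    · simp only [pvVowelSet, PySem.Set.mem_ofList, List.mem_filter]
      constructor <;> intro hx <;> exfalso <;> exact hv (by simpa using hx.2)

theorem a_eq_filter (w0 : String) (rest : List String) :
    same_vowel_group (w0 :: rest)
      = w0 :: rest.filter (fun w => pvVowelSig w == pvVowelSig w0) := by
  show rest.foldl (fun result word =>
      if PySem.Set.equal (pvVowelSet word) (pvVowelSet w0) then result ++ [word] else result)
      [w0] = _
  rw [PySem.List.foldl_append_if]
  simp only [List.map_id', List.singleton_append, List.cons.injEq, true_and]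
  apply List.filter_congr
  intro w _
  rcases Bool.eq_false_or_eq_true (PySem.Set.equal (pvVowelSet w) (pvVowelSet w0)) with h | h
  · simp only [h]
    symm
    rw [beq_iff_eq]
    exact (vowelSet_equal_iff_sig_eq w w0).mp h
  · simp only [h]
    symm
    rw [beq_eq_false_iff_ne]
    intro hs
    rw [← vowelSet_equal_iff_sig_eq] at hs
    simp [hs] at h

theorem b_eq_filter (w0 : String) (rest : List String) :
    same_vowel_group_alt (w0 :: rest)
      = w0 :: rest.filter (fun w => pvVowelSig w == pvVowelSig w0) := by
  unfold same_vowel_group_alt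
  simp only
  have hmap : ∀ (ws : List String) (d : PySem.Dict (List Char) (List String)),
      ws.foldl (fun d w => d.modify (pvVowelSig w) [] (fun l => l ++ [w])) d
        = (ws.map (fun w => (pvVowelSig w, w))).foldl
            (fun d p => d.modify p.1 [] (fun l => l ++ [p.2])) d := by
    intro ws d; rw [List.foldl_map]
  rw [hmap, PySem.Dict.getD_foldl_modify_append]
  simp [List.filter_map, Function.comp_def]

-- ===== VERDICT (by name: the statement is the Claim_ definition above) =====
theorem same_vowel_group_spec : Claim_equal_same_vowel_group := by
  intro words _ hpre
  unfold Spec_same_vowel_group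
  match words with
  | [] => exact absurd rfl hpre
  | w0 :: rest => rw [a_eq_filter, b_eq_filter]
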